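-- pv_equiv track=rewrite | github.com/Adam0s007/DSA | exams/egzamin3 - 2021/zad2.py | double_prefix
-- ===== SOURCE A (Python) =====
-- def double_prefix( L ):
--     """tu prosze wpisac wlasna implementacje"""
--     slowniczek = {}
--     for word in L:
--         for i in range(1,len(word)+1):
--             prefix = word[:i]
--             slowniczek[prefix] = slowniczek.get(prefix,0) + 1 #dict.get(key,default=value)
--                                                              # dict[key] = [value1,value2,...]
--                                                              #.get ==> dict[key].append(costam)
--     ans = []
--
--     for prefix,counter in slowniczek.items(): # for keys in slownik.keys() , for values in slownik.values()
--         if counter >= 2: #prefix - fajny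
--             if (prefix + "0" not in slowniczek and prefix + '1' not in slowniczek):
--                 ans.append(prefix)
--             elif (prefix + "0" in slowniczek and prefix + '1' in slowniczek):
--                 if slowniczek.get(prefix + "0") < 2 and slowniczek.get(prefix + "1") < 2:
--                    ans.append(prefix)
--             #teraz wiemy ze jednego nie ma w slowniku!
--             elif (prefix + "0" in slowniczek and slowniczek.get(prefix + "0") < 2) or (prefix + "1" in slowniczek and slowniczek.get(prefix + "1") < 2):
--                 ans.append(prefix)
--     return ans
-- ===== SOURCE B (Python) =====
-- # Same result as A, but each word's prefixes are built incrementally (one running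
-- # string per character instead of slicing word[:i] for every i) and the output
-- # rule is one flat condition instead of A's four branches.
-- def double_prefix(L):
--     counts = {}
--     for word in L:
--         pre = ""
--         for ch in word:
--             pre += ch
--             counts[pre] = counts.get(pre, 0) + 1
--     return [p for p, c in counts.items()
--             if c >= 2 and counts.get(p + "0", 0) < 2 and counts.get(p + "1", 0) < 2]
-- ===== Notes on version B (the rewrite author's own statement) =====
-- stated objective: simpler
-- what changed: B builds each word's prefix counter incrementally (extending one running string per character instead of slicing word[:i] for every i) and replaces A's four-branch membership case analysis with a single flat condition using get with default 0.
import Mathlib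
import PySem

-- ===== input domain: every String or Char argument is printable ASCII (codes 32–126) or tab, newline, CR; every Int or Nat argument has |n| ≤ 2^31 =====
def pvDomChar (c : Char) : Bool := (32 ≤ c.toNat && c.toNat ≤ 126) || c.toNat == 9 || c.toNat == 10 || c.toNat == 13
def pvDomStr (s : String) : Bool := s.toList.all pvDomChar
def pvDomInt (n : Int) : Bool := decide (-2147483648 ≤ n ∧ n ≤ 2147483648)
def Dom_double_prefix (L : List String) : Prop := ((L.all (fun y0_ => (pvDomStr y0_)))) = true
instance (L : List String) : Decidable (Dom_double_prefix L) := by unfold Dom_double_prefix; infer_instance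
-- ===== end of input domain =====

-- B counts each word's prefixes incrementally (one growing string per character instead of
-- slicing word[:i] for every i) and emits with one flat condition instead of A's four branches.

-- ===== PORT A =====
-- A's first loop: slowniczek[word[:i]] = slowniczek.get(word[:i], 0) + 1 for i = 1..len(word)
def pvBuildA (L : List String) : PySem.Dict String Int :=
  L.foldl (fun d word =>
    (PySem.List.pyRange 1 (PySem.Str.len word + 1) 1).foldl (fun d i =>
      let pfx := PySem.Str.slice word none (some i)
      d.insert pfx (d.getD pfx 0 + 1)) d)
    PySem.Dict.empty

-- A's second loop; pc.1/pc.2 are A's `prefix`/`counter`.  A's `slowniczek.get(prefix + "0")`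
-- is evaluated only under the membership guard, where it equals `getD _ 0` (identical value).
def double_prefix (L : List String) : List String :=
  let slowniczek := pvBuildA L
  slowniczek.items.foldl (fun ans pc =>
    if pc.2 ≥ 2 then
      if ¬ slowniczek.contains (pc.1 ++ "0") ∧ ¬ slowniczek.contains (pc.1 ++ "1") then
        ans ++ [pc.1]
      else if slowniczek.contains (pc.1 ++ "0") ∧ slowniczek.contains (pc.1 ++ "1") then
        if slowniczek.getD (pc.1 ++ "0") 0 < 2 ∧ slowniczek.getD (pc.1 ++ "1") 0 < 2 then
          ans ++ [pc.1]
        else ans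
      else if (slowniczek.contains (pc.1 ++ "0") = true ∧ slowniczek.getD (pc.1 ++ "0") 0 < 2) ∨
              (slowniczek.contains (pc.1 ++ "1") = true ∧ slowniczek.getD (pc.1 ++ "1") 0 < 2) then
        ans ++ [pc.1]
      else ans
    else ans) []

-- ===== PORT B =====
-- B's first loop: one running prefix per word; `pre += ch` is appending the one-char string.
def pvBuildB (L : List String) : PySem.Dict String Int :=
  L.foldl (fun d word =>
    (word.toList.foldl (fun (st : PySem.Dict String Int × String) ch =>
      let pre := st.2 ++ String.ofList [ch]
      (st.1.insert pre (st.1.getD pre 0 + 1), pre)) (d, "")).1)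
    PySem.Dict.empty

-- B's list comprehension over counts.items()
def double_prefix_alt (L : List String) : List String :=
  let counts := pvBuildB L
  (counts.items.filter (fun pc =>
      decide (pc.2 ≥ 2) && decide (counts.getD (pc.1 ++ "0") 0 < 2) &&
      decide (counts.getD (pc.1 ++ "1") 0 < 2))).map (·.1)

-- ===== PRECONDITION & SPEC =====
def Spec_double_prefix (L : List String) (out : List String) : Prop := out = double_prefix_alt L
instance (L : List String) (out : List String) : Decidable (Spec_double_prefix L out) := by unfold Spec_double_prefix; infer_instance

-- ===== CLAIM (what is proved, stated in full; the proofs are below) =====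
def Claim_equal_double_prefix : Prop := ∀ (L : List String), Dom_double_prefix L → Spec_double_prefix L (double_prefix L)

-- ===== LEMMAS AND PROOFS =====

-- the common counting step: d[p] = d.get(p, 0) + 1
def pvIns (d : PySem.Dict String Int) (p : String) : PySem.Dict String Int :=
  d.insert p (d.getD p 0 + 1)

-- A's inner loop over word[:i], i = 1..len(word), as a fold over prefix lengths
theorem pv_innerA (word : String) (d : PySem.Dict String Int) :
    (PySem.List.pyRange 1 (PySem.Str.len word + 1) 1).foldl (fun d i =>
        let pfx := PySem.Str.slice word none (some i)
        d.insert pfx (d.getD pfx 0 + 1)) d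
      = (List.range word.toList.length).foldl
          (fun d k => pvIns d (String.ofList (word.toList.take (k + 1)))) d := by
  rw [PySem.List.pyRange_one, List.foldl_map]
  have hn : (PySem.Str.len word + 1 - 1).toNat = word.toList.length := by
    simp [PySem.Str.len_eq]
  rw [hn]
  congr 1
  funext d k
  have hcast : (1 + (k : Int)) = ((k + 1 : Nat) : Int) := by push_cast; ring
  have hsl : PySem.Chars.slice word.toList none (some ((k + 1 : Nat) : Int))
      = word.toList.take (k + 1) := PySem.List.slice_to_natCast _ _
  simp only [hcast, PySem.Str.slice, pvIns, hsl]

-- B's inner loop: incremental prefix building, from an arbitrary already-built prefix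
theorem pv_innerB (cs : List Char) : ∀ (pre : List Char) (d : PySem.Dict String Int),
    cs.foldl (fun (st : PySem.Dict String Int × String) ch =>
        let p := st.2 ++ String.ofList [ch]
        (st.1.insert p (st.1.getD p 0 + 1), p)) (d, String.ofList pre)
      = ((List.range cs.length).foldl
          (fun d k => pvIns d (String.ofList (pre ++ cs.take (k + 1)))) d,
         String.ofList (pre ++ cs)) := by
  induction cs with
  | nil => intro pre d; simp
  | cons c cs ih =>
    intro pre d
    have hc : String.ofList pre ++ String.ofList [c] = String.ofList (pre ++ [c]) := by
      simp
    simp only [List.foldl_cons, hc]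
    rw [show ((PySem.Dict.insert d (String.ofList (pre ++ [c]))
          (d.getD (String.ofList (pre ++ [c])) 0 + 1), String.ofList (pre ++ [c]))
          : PySem.Dict String Int × String)
        = (pvIns d (String.ofList (pre ++ [c])), String.ofList (pre ++ [c])) from rfl]
    rw [ih (pre ++ [c])]
    rw [List.length_cons, List.range_succ_eq_map, List.foldl_cons, List.foldl_map]
    refine Prod.ext ?_ ?_
    · show List.foldl _ _ _ = List.foldl _ _ _
      congr 1
      funext d k
      congr 2
      simp [List.take_succ_cons]
    · simp

-- the two dict-building passes agree
theorem pv_dict_eq (L : List String) : pvBuildA L = pvBuildB L := by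
  unfold pvBuildA pvBuildB
  congr 1
  funext d word
  have hempty : ("" : String) = String.ofList [] := rfl
  rw [pv_innerA, hempty, pv_innerB word.toList [] d]
  simp

-- B's flat output condition
def pvCond (d : PySem.Dict String Int) (pc : String × Int) : Bool :=
  decide (pc.2 ≥ 2) && decide (d.getD (pc.1 ++ "0") 0 < 2) && decide (d.getD (pc.1 ++ "1") 0 < 2)

-- A's branch cascade computes exactly B's flat condition
theorem pv_body_eq (d : PySem.Dict String Int) (ans : List String) (pc : String × Int) :
    (if pc.2 ≥ 2 then
      if ¬ d.contains (pc.1 ++ "0") ∧ ¬ d.contains (pc.1 ++ "1") then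
        ans ++ [pc.1]
      else if d.contains (pc.1 ++ "0") ∧ d.contains (pc.1 ++ "1") then
        if d.getD (pc.1 ++ "0") 0 < 2 ∧ d.getD (pc.1 ++ "1") 0 < 2 then
          ans ++ [pc.1]
        else ans
      else if (d.contains (pc.1 ++ "0") = true ∧ d.getD (pc.1 ++ "0") 0 < 2) ∨
              (d.contains (pc.1 ++ "1") = true ∧ d.getD (pc.1 ++ "1") 0 < 2) then
        ans ++ [pc.1]
      else ans
    else ans)
    = (if pvCond d pc then ans ++ [pc.1] else ans) := by
  rcases Bool.eq_false_or_eq_true (d.contains (pc.1 ++ "0")) with h0 | h0 <;>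
    rcases Bool.eq_false_or_eq_true (d.contains (pc.1 ++ "1")) with h1 | h1 <;>
    (try have e0 := PySem.Dict.getD_of_not_contains d (0 : Int) h0) <;>
    (try have e1 := PySem.Dict.getD_of_not_contains d (0 : Int) h1) <;>
    by_cases ha : pc.2 ≥ 2 <;>
    by_cases g0 : d.getD (pc.1 ++ "0") 0 < 2 <;>
    by_cases g1 : d.getD (pc.1 ++ "1") 0 < 2 <;>
    (try simp [pvCond, ha, g0, g1, h0, h1]) <;> omega

-- ===== VERDICT (by name: the statement is the Claim_ definition above) =====
theorem double_prefix_spec : Claim_equal_double_prefix := by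
  intro L _
  unfold Spec_double_prefix double_prefix double_prefix_alt
  rw [pv_dict_eq]
  set d := pvBuildB L with hd
  have hbody : (fun (ans : List String) (pc : String × Int) =>
      (if pc.2 ≥ 2 then
        if ¬ d.contains (pc.1 ++ "0") ∧ ¬ d.contains (pc.1 ++ "1") then
          ans ++ [pc.1]
        else if d.contains (pc.1 ++ "0") ∧ d.contains (pc.1 ++ "1") then
          if d.getD (pc.1 ++ "0") 0 < 2 ∧ d.getD (pc.1 ++ "1") 0 < 2 then
            ans ++ [pc.1]
          else ans
        else if (d.contains (pc.1 ++ "0") = true ∧ d.getD (pc.1 ++ "0") 0 < 2) ∨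
                (d.contains (pc.1 ++ "1") = true ∧ d.getD (pc.1 ++ "1") 0 < 2) then
          ans ++ [pc.1]
        else ans
      else ans))
      = (fun ans pc => if pvCond d pc then ans ++ [pc.1] else ans) := by
    funext ans pc; exact pv_body_eq d ans pc
  show d.items.foldl _ [] = _
  rw [hbody, PySem.List.foldl_append_if (pvCond d) (·.1) d.items []]
  simp only [List.nil_append]
  exact congrArg _ (List.filter_congr (fun pc _ => by simp [pvCond]))
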